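-- pv_equiv track=rewrite | github.com/bxdn/advent-of-code-2024 | 12-14/star_2.py | found_tree
-- ===== SOURCE A (Python) =====
-- def found_tree(grid):
--     for line in grid:
--         consecutive = 0
--         for b in line:
--             consecutive = consecutive + 1 if b else 0
--             if consecutive >= 10:
--                 return True
--     return False
-- ===== SOURCE B (Python) =====
-- from itertools import groupby
--
-- def found_tree(grid):
--     for line in grid:
--         for key, group in groupby(line, key=bool):
--             if key and sum(1 for _ in group) >= 10:
--                 return True
--     return False
-- ===== Notes on version B (the rewrite author's own statement) =====
-- stated objective: idiomatic
-- what changed: Replaces the hand-maintained consecutive counter with itertools.groupby: each row is split into maximal runs of equal truthiness and B returns True on the first True-run of length >= 10.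
import Mathlib
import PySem

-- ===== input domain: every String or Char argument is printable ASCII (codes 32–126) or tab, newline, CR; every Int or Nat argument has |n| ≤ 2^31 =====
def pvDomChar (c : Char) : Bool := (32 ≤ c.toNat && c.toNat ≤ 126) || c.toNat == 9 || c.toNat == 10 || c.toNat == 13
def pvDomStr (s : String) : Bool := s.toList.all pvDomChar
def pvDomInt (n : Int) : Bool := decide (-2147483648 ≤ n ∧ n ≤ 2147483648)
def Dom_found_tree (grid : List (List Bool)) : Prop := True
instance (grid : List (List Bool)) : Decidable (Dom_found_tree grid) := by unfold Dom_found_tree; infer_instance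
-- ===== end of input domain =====

-- B: same task via run-length grouping (itertools.groupby) instead of a hand-maintained counter; idiomatic, same cost.

-- ===== PORT A =====
-- inner loop of A: counter c of consecutive truthy cells, early return at 10
def pvLineLoop : List Bool → Nat → Bool
  | [], _ => false
  | b :: rest, c =>
    let c' := if b then c + 1 else 0
    if 10 ≤ c' then true else pvLineLoop rest c'

def found_tree : List (List Bool) → Bool
  | [] => false
  | line :: rest => if pvLineLoop line 0 then true else found_tree rest

-- ===== PORT B =====
-- port of itertools.groupby on a Bool list: maximal runs as (value, length) pairs
def pvGroupRuns : List Bool → List (Bool × Nat)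
  | [] => []
  | b :: xs =>
    match pvGroupRuns xs with
    | [] => [(b, 1)]
    | (b', n) :: t => if b == b' then (b, n + 1) :: t else (b, 1) :: (b', n) :: t

def found_tree_alt (grid : List (List Bool)) : Bool :=
  grid.any (fun line => (pvGroupRuns line).any (fun p => p.1 && decide (10 ≤ p.2)))

-- ===== PRECONDITION & SPEC =====
def Spec_found_tree (grid : List (List Bool)) (out : Bool) : Prop := out = found_tree_alt grid
instance (grid : List (List Bool)) (out : Bool) : Decidable (Spec_found_tree grid out) := by unfold Spec_found_tree; infer_instance

-- ===== CLAIM (what is proved, stated in full; the proofs are below) =====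
def Claim_equal_found_tree : Prop := ∀ (grid : List (List Bool)), Dom_found_tree grid → Spec_found_tree grid (found_tree grid)

-- ===== LEMMAS AND PROOFS =====

-- length of the leading run of `true`s
def pvLead : List Bool → Nat
  | [] => 0
  | b :: xs => if b then pvLead xs + 1 else 0

-- length of the longest run of `true`s
def pvMaxRun : List Bool → Nat
  | [] => 0
  | b :: xs => max (pvLead (b :: xs)) (pvMaxRun xs)

-- maximum length among the `true` entries of a run list
def pvMaxTrue : List (Bool × Nat) → Nat
  | [] => 0
  | p :: t => if p.1 then max p.2 (pvMaxTrue t) else pvMaxTrue t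

theorem pvLead_le_maxRun (l : List Bool) : pvLead l ≤ pvMaxRun l := by
  cases l with
  | nil => simp [pvLead, pvMaxRun]
  | cons b xs => simp [pvMaxRun]

theorem pvLineLoop_eq (l : List Bool) : ∀ c, c < 10 →
    pvLineLoop l c = decide (10 ≤ max (c + pvLead l) (pvMaxRun l)) := by
  induction l with
  | nil => intro c hc; simp [pvLineLoop, pvLead, pvMaxRun]; omega
  | cons b xs ih =>
    intro c hc
    cases b with
    | false =>
      have h1 : pvLineLoop (false :: xs) c = pvLineLoop xs 0 := by simp [pvLineLoop]
      rw [h1, ih 0 (by omega)]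
      have h := pvLead_le_maxRun xs
      simp only [pvLead, pvMaxRun, Bool.false_eq_true, if_false, decide_eq_decide]
      omega
    | true =>
      simp only [pvLineLoop, pvLead, pvMaxRun, if_true]
      by_cases h10 : 10 ≤ c + 1
      · rw [if_pos h10]
        have : 10 ≤ max (c + (pvLead xs + 1)) (max (pvLead xs + 1) (pvMaxRun xs)) := by omega
        simp [this]
      · rw [if_neg h10, ih (c + 1) (by omega)]
        simp only [decide_eq_decide]
        omega

theorem pvGroupRuns_cons_ne_nil (b : Bool) (xs : List Bool) : pvGroupRuns (b :: xs) ≠ [] := by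
  simp only [pvGroupRuns]
  cases h : pvGroupRuns xs with
  | nil => simp
  | cons p t =>
    obtain ⟨b', n⟩ := p
    by_cases hb : b == b' <;> simp [hb]

-- joint characterisation of pvGroupRuns: its head run length and pvMaxTrue
theorem pvGroupRuns_spec (l : List Bool) :
    (pvLead l = (match pvGroupRuns l with | (true, n) :: _ => n | _ => 0)) ∧
    pvMaxRun l = pvMaxTrue (pvGroupRuns l) := by
  induction l with
  | nil => simp [pvLead, pvMaxRun, pvGroupRuns, pvMaxTrue]
  | cons b xs ih =>
    obtain ⟨ihL, ihM⟩ := ih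
    cases hg : pvGroupRuns xs with
    | nil =>
      have hxs : xs = [] := by
        cases xs with
        | nil => rfl
        | cons y ys => exact absurd hg (pvGroupRuns_cons_ne_nil y ys)
      subst hxs
      cases b <;> simp [pvGroupRuns, pvLead, pvMaxRun, pvMaxTrue]
    | cons p t =>
      obtain ⟨b', n⟩ := p
      rw [hg] at ihL ihM
      have hstep : pvGroupRuns (b :: xs) =
          if b == b' then (b, n + 1) :: t else (b, 1) :: (b', n) :: t := by
        simp only [pvGroupRuns, hg]
      cases b <;> cases b' <;> simp at hstep
      · -- b = false, b' = false
        refine ⟨by simp [hstep, pvLead], ?_⟩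
        simp only [pvMaxTrue] at ihM
        simp [hstep, pvMaxRun, pvLead, pvMaxTrue, ihM]
      · -- b = false, b' = true
        refine ⟨by simp [hstep, pvLead], ?_⟩
        simp only [pvMaxTrue] at ihM
        simp [hstep, pvMaxRun, pvLead, pvMaxTrue, ihM]
      · -- b = true, b' = false
        have hl : pvLead xs = 0 := by simpa using ihL
        refine ⟨by simp [hstep, pvLead, hl], ?_⟩
        simp only [pvMaxTrue] at ihM
        simp [hstep, pvMaxRun, pvLead, pvMaxTrue, ihM, hl]
      · -- b = true, b' = true
        have hl : pvLead xs = n := by simpa using ihL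
        refine ⟨by simp [hstep, pvLead, hl], ?_⟩
        simp only [pvMaxTrue] at ihM
        simp only [hstep, pvMaxRun, pvLead, pvMaxTrue, hl, if_true] at ihM ⊢
        omega

theorem pvAny_eq_maxTrue (rs : List (Bool × Nat)) :
    rs.any (fun p => p.1 && decide (10 ≤ p.2)) = decide (10 ≤ pvMaxTrue rs) := by
  induction rs with
  | nil => simp [pvMaxTrue]
  | cons p t ih =>
    obtain ⟨b, n⟩ := p
    cases b with
    | false => simp [pvMaxTrue, ih]
    | true =>
      simp only [List.any_cons, pvMaxTrue, if_true, ih]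
      by_cases h : 10 ≤ n
      · have : 10 ≤ max n (pvMaxTrue t) := by omega
        simp [h, this]
      · have : (10 ≤ max n (pvMaxTrue t)) ↔ (10 ≤ pvMaxTrue t) := by omega
        simp [h, this]

theorem pvLine_eq (line : List Bool) :
    pvLineLoop line 0 = (pvGroupRuns line).any (fun p => p.1 && decide (10 ≤ p.2)) := by
  rw [pvLineLoop_eq line 0 (by omega), pvAny_eq_maxTrue, ← (pvGroupRuns_spec line).2]
  have h := pvLead_le_maxRun line
  simp only [decide_eq_decide]
  omega

-- ===== VERDICT (by name: the statement is the Claim_ definition above) =====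
theorem found_tree_spec : Claim_equal_found_tree := by
  intro grid _
  unfold Spec_found_tree
  induction grid with
  | nil => rfl
  | cons line rest ih =>
    simp only [found_tree, found_tree_alt, List.any_cons, pvLine_eq]
    by_cases h : (pvGroupRuns line).any (fun p => p.1 && decide (10 ≤ p.2)) = true
    · simp [h]
    · simp only [Bool.not_eq_true] at h
      simp [found_tree_alt, h, ih trivial]
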